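-- pv_equiv track=rewrite | github.com/sergiudm/schedule-everything | src/schedule_management/install_config_wizard.py | _find_section_bounds
-- ===== SOURCE A (Python) =====
-- def _find_section_bounds(lines: list[str]) -> dict[str, tuple[int, int]]:
--     bounds: dict[str, tuple[int, int]] = {}
--     headers: list[tuple[str, int]] = []
--
--     for idx, line in enumerate(lines):
--         stripped = line.strip()
--         if stripped.startswith("[") and stripped.endswith("]") and "=" not in stripped:
--             section_name = stripped[1:-1].strip()
--             if section_name:
--                 headers.append((section_name, idx))
--
--     for idx, (section_name, start_idx) in enumerate(headers):
--         end_idx = headers[idx + 1][1] if idx + 1 < len(headers) else len(lines)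
--         bounds[section_name] = (start_idx, end_idx)
--
--     return bounds
-- ===== SOURCE B (Python) =====
-- def _header_name(line):
--     stripped = line.strip()
--     if stripped.startswith("[") and stripped.endswith("]") and "=" not in stripped:
--         name = stripped[1:-1].strip()
--         if name:
--             return name
--     return None
--
--
-- def _find_section_bounds(lines: list[str]) -> dict[str, tuple[int, int]]:
--     bounds: dict[str, tuple[int, int]] = {}
--     current_name = None
--     current_start = 0
--     for idx, line in enumerate(lines):
--         name = _header_name(line)
--         if name is not None:
--             if current_name is not None:
--                 bounds[current_name] = (current_start, idx)
--             current_name = name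
--             current_start = idx
--     if current_name is not None:
--         bounds[current_name] = (current_start, len(lines))
--     return bounds
-- ===== Notes on version B (the rewrite author's own statement) =====
-- stated objective: alternative
-- what changed: Replaces A's two passes (collect all headers with indices, then a second indexed loop with headers[idx+1] lookahead) by one state-machine pass that keeps the currently open section and closes it when the next valid header or the end of input is reached; the intermediate headers list disappears.
import Mathlib
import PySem

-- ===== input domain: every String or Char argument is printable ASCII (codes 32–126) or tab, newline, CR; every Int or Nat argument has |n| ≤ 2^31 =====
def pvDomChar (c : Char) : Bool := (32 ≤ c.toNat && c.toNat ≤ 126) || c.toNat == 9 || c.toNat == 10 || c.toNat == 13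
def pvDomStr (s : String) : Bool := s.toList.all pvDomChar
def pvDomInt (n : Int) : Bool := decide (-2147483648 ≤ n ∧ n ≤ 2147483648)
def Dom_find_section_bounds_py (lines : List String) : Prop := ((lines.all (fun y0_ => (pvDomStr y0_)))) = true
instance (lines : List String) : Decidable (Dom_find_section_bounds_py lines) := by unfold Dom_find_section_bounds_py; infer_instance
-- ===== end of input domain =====

-- B replaces A's two-pass (headers list, then indexed lookahead loop) by one state-machine pass; alternative decomposition, no speed claim.

-- ===== PORT A =====
def find_section_bounds_py (lines : List String) : List (String × Int × Int) :=
  let headers : List (String × Int) :=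
    (PySem.List.enumerate lines).foldl (fun hs p =>
      let stripped := PySem.Str.strip p.2
      if PySem.Str.startswith stripped "[" && PySem.Str.endswith stripped "]"
          && !(PySem.Str.isIn "=" stripped) then
        let section_name := PySem.Str.strip (PySem.Str.slice stripped (some 1) (some (-1)))
        if section_name ≠ "" then hs ++ [(section_name, p.1)] else hs
      else hs) []
  let bounds : PySem.Dict String (Int × Int) :=
    (PySem.List.enumerate headers).foldl (fun d q =>
      let end_idx : Int :=
        if q.1 + 1 < (headers.length : Int) then
          ((PySem.List.pyGet? headers (q.1 + 1)).getD ("", 0)).2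
        else (lines.length : Int)
      d.insert q.2.1 (q.2.2, end_idx)) PySem.Dict.empty
  bounds.items

-- ===== PORT B =====
def headerName? (line : String) : Option String :=
  let stripped := PySem.Str.strip line
  if PySem.Str.startswith stripped "[" && PySem.Str.endswith stripped "]"
      && !(PySem.Str.isIn "=" stripped) then
    let name := PySem.Str.strip (PySem.Str.slice stripped (some 1) (some (-1)))
    if name ≠ "" then some name else none
  else none

def altGo (total : Int) (i : Int) (ls : List String) (cur : Option (String × Int))
    (d : PySem.Dict String (Int × Int)) : PySem.Dict String (Int × Int) :=
  match ls with
  | [] =>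
    match cur with
    | some (n, s) => d.insert n (s, total)
    | none => d
  | l :: rest =>
    match headerName? l with
    | some n =>
      match cur with
      | some (cn, cs) => altGo total (i + 1) rest (some (n, i)) (d.insert cn (cs, i))
      | none => altGo total (i + 1) rest (some (n, i)) d
    | none => altGo total (i + 1) rest cur d

def find_section_bounds_py_alt (lines : List String) : List (String × Int × Int) :=
  (altGo (lines.length : Int) 0 lines none PySem.Dict.empty).items

-- ===== PRECONDITION & SPEC =====
def Spec_find_section_bounds_py (lines : List String) (out : List (String × Int × Int)) : Prop := out = find_section_bounds_py_alt lines
instance (lines : List String) (out : List (String × Int × Int)) : Decidable (Spec_find_section_bounds_py lines out) := by unfold Spec_find_section_bounds_py; infer_instance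

-- ===== CLAIM (what is proved, stated in full; the proofs are below) =====
def Claim_equal_find_section_bounds_py : Prop := ∀ (lines : List String), Dom_find_section_bounds_py lines → Spec_find_section_bounds_py lines (find_section_bounds_py lines)

-- ===== LEMMAS AND PROOFS =====

-- spec-level list of headers with absolute indices
def hdrs (i : Int) : List String → List (String × Int)
  | [] => []
  | l :: rest =>
    match headerName? l with
    | some n => (n, i) :: hdrs (i + 1) rest
    | none => hdrs (i + 1) rest

-- spec-level builder: close each header at the next header's index (or total)
def aBuild (total : Int) (d : PySem.Dict String (Int × Int)) :
    List (String × Int) → PySem.Dict String (Int × Int)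
  | [] => d
  | (n, s) :: rest =>
    aBuild total (d.insert n (s, match rest with | (_, s') :: _ => s' | [] => total)) rest

theorem step_eq (l : String) (i : Int) (hs : List (String × Int)) :
    (let stripped := PySem.Str.strip l
     if PySem.Str.startswith stripped "[" && PySem.Str.endswith stripped "]"
         && !(PySem.Str.isIn "=" stripped) then
       let section_name := PySem.Str.strip (PySem.Str.slice stripped (some 1) (some (-1)))
       if section_name ≠ "" then hs ++ [(section_name, i)] else hs
     else hs) =
    hs ++ (match headerName? l with | some n => [(n, i)] | none => []) := by
  unfold headerName?
  by_cases h1 : (PySem.Str.startswith (PySem.Str.strip l) "[" && PySem.Str.endswith (PySem.Str.strip l) "]"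
      && !(PySem.Str.isIn "=" (PySem.Str.strip l))) = true
  · rw [if_pos h1, if_pos h1]
    by_cases h2 : PySem.Str.strip (PySem.Str.slice (PySem.Str.strip l) (some 1) (some (-1))) ≠ ""
    · rw [if_pos h2, if_pos h2]
    · rw [if_neg h2, if_neg h2]
      simp
  · rw [if_neg h1, if_neg h1]
    simp

theorem hdrs_cons (l : String) (rest : List String) (i : Int) :
    hdrs i (l :: rest) =
      (match headerName? l with | some n => [(n, i)] | none => []) ++ hdrs (i + 1) rest := by
  cases h : headerName? l <;> simp [hdrs, h]

theorem fold1_eq_hdrs (ls : List String) : ∀ (i : Int) (hs : List (String × Int)),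
    (PySem.List.enumerate ls i).foldl (fun hs p =>
      let stripped := PySem.Str.strip p.2
      if PySem.Str.startswith stripped "[" && PySem.Str.endswith stripped "]"
          && !(PySem.Str.isIn "=" stripped) then
        let section_name := PySem.Str.strip (PySem.Str.slice stripped (some 1) (some (-1)))
        if section_name ≠ "" then hs ++ [(section_name, p.1)] else hs
      else hs) hs = hs ++ hdrs i ls := by
  induction ls with
  | nil => intro i hs; simp [PySem.List.enumerate_nil, hdrs]
  | cons l rest ih =>
    intro i hs
    rw [PySem.List.enumerate_cons, List.foldl_cons, ih, hdrs_cons]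
    show (let stripped := PySem.Str.strip l
      if PySem.Str.startswith stripped "[" && PySem.Str.endswith stripped "]"
          && !(PySem.Str.isIn "=" stripped) then
        let section_name := PySem.Str.strip (PySem.Str.slice stripped (some 1) (some (-1)))
        if section_name ≠ "" then hs ++ [(section_name, i)] else hs
      else hs) ++ hdrs (i + 1) rest =
      hs ++ ((match headerName? l with | some n => [(n, i)] | none => []) ++ hdrs (i + 1) rest)
    rw [step_eq, List.append_assoc]

theorem fold2_eq_aBuild (H : List (String × Int)) (total : Int) :
    ∀ (suffix : List (String × Int)) (k : Nat) (d : PySem.Dict String (Int × Int)),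
    H.drop k = suffix →
    (PySem.List.enumerate suffix (k : Int)).foldl (fun d q =>
      let end_idx : Int :=
        if q.1 + 1 < (H.length : Int) then
          ((PySem.List.pyGet? H (q.1 + 1)).getD ("", 0)).2
        else total
      d.insert q.2.1 (q.2.2, end_idx)) d = aBuild total d suffix := by
  intro suffix
  induction suffix with
  | nil => intro k d _; rw [PySem.List.enumerate_nil]; rfl
  | cons p rest ih =>
    intro k d hk
    obtain ⟨n, s⟩ := p
    rw [PySem.List.enumerate_cons, List.foldl_cons]
    have hrest : H.drop (k + 1) = rest := by
      have h1 : (H.drop k).drop 1 = rest := by rw [hk]; rfl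
      rw [List.drop_drop] at h1
      simpa [Nat.add_comm] using h1
    have hlen : H.length = k + 1 + rest.length := by
      have h1 : k < H.length := by
        by_contra h
        rw [List.drop_eq_nil_of_le (by omega)] at hk
        exact (List.cons_ne_nil _ _) hk.symm
      have := congrArg List.length hk
      simp [List.length_drop] at this
      omega
    have hget : PySem.List.pyGet? H ((k : Int) + 1) = rest.head? := by
      have : ((k : Int) + 1) = ((k + 1 : Nat) : Int) := by push_cast; ring
      rw [this, PySem.List.pyGet?_natCast]
      rw [← hrest]
      cases h : H.drop (k + 1) with
      | nil => simp [List.drop_eq_nil_iff.mp h]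
      | cons a t =>
        have : H[(k+1)]? = (H.drop (k+1))[0]? := by
          rw [List.getElem?_drop]
        simp [this, h]
    have hbody : (if (k : Int) + 1 < (H.length : Int) then
          ((PySem.List.pyGet? H ((k : Int) + 1)).getD ("", 0)).2
        else total) = (match rest with | (_, s') :: _ => s' | [] => total) := by
      cases rest with
      | nil =>
        have h : ¬ ((k : Int) + 1 < (H.length : Int)) := by
          simp only [hlen, List.length_nil]; push_cast; omega
        simp [h]
      | cons q t =>
        have h : (k : Int) + 1 < (H.length : Int) := by
          simp only [hlen, List.length_cons]; push_cast; omega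
        simp only [h, if_true, hget]
        cases q; rfl
    rw [show ((k : Int) + 1) = ((k + 1 : Nat) : Int) from by push_cast; ring]
    rw [ih (k + 1) _ hrest]
    show aBuild total (d.insert n (s,
        if (k : Int) + 1 < (H.length : Int) then
          ((PySem.List.pyGet? H ((k : Int) + 1)).getD ("", 0)).2
        else total)) rest =
      aBuild total d ((n, s) :: rest)
    rw [hbody]
    cases rest with
    | nil => rfl
    | cons x t => cases x; rfl

theorem altGo_eq_aBuild (total : Int) (ls : List String) :
    ∀ (i : Int) (cur : Option (String × Int)) (d : PySem.Dict String (Int × Int)),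
    altGo total i ls cur d =
      aBuild total d ((match cur with | some p => [p] | none => []) ++ hdrs i ls) := by
  induction ls with
  | nil =>
    intro i cur d
    cases cur with
    | none => simp [altGo, hdrs, aBuild]
    | some p => obtain ⟨n, s⟩ := p; simp [altGo, hdrs, aBuild]
  | cons l rest ih =>
    intro i cur d
    unfold altGo hdrs
    cases h : headerName? l with
    | none =>
      simp only []
      rw [ih]
    | some n =>
      cases cur with
      | none => simp only []; rw [ih]; rfl
      | some p =>
        obtain ⟨cn, cs⟩ := p
        simp only []
        rw [ih]
        rfl

-- ===== VERDICT (by name: the statement is the Claim_ definition above) =====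
theorem find_section_bounds_py_spec : Claim_equal_find_section_bounds_py := by
  intro lines _
  show find_section_bounds_py lines = find_section_bounds_py_alt lines
  unfold find_section_bounds_py find_section_bounds_py_alt
  rw [altGo_eq_aBuild, fold1_eq_hdrs lines 0 []]
  simp only [List.nil_append]
  have h2 := fold2_eq_aBuild (hdrs 0 lines) (lines.length : Int) (hdrs 0 lines) 0
    PySem.Dict.empty (by simp)
  simp only [Nat.cast_zero] at h2
  rw [h2]
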